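-- pv_equiv track=rewrite | github.com/mari-mohmd/code-review | lib/analyzer.py | _is_formatting_only
-- ===== SOURCE A (Python) =====
-- def _is_formatting_only(old_text: str, new_text: str) -> bool:
--     """
--     Return True if old_text and new_text are semantically identical
--     after normalising all whitespace — meaning the change is purely
--     cosmetic (line splitting, indentation adjustment, trailing space
--     removal, etc.) and contains no change to logic or values.
--
--     Strategy:
--       1. Strip all leading/trailing whitespace from each line
--       2. Remove blank lines
--       3. Join into a single whitespace-normalised string
--       4. Compare — if equal, the change is formatting only
--
--     This catches:
--       - A long line split across multiple lines
--       - Indentation reformatted (2-space to 4-space etc.)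
--       - Trailing whitespace removed
--       - Blank lines added or removed between statements
--
--     It does NOT treat as formatting-only:
--       - Any change to an identifier name
--       - Any change to a literal value
--       - Any added or removed statement
--       - Any reordering of statements
--     """
--
--     def normalise(text: str) -> str:
--         tokens = []
--         for line in text.splitlines():
--             stripped = line.strip()
--             if stripped:
--                 # Collapse internal whitespace to single space
--                 tokens.append(" ".join(stripped.split()))
--         return " ".join(tokens)
--
--     return normalise(old_text) == normalise(new_text)
-- ===== SOURCE B (Python) =====
-- def _is_formatting_only(old_text: str, new_text: str) -> bool:
--     # One global whitespace tokenization: str.split() already discards blank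
--     # segments and splits at newlines, so no per-line processing is needed.
--     return " ".join(old_text.split()) == " ".join(new_text.split())
-- ===== Notes on version B (the rewrite author's own statement) =====
-- stated objective: simpler
-- what changed: Replaces the per-line pipeline (splitlines, strip each line, drop blank lines, split/join within each line, join the lines) by one global whitespace tokenization ' '.join(text.split()), relying on the fact that every line-boundary character is itself whitespace to str.split().
import Mathlib
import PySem

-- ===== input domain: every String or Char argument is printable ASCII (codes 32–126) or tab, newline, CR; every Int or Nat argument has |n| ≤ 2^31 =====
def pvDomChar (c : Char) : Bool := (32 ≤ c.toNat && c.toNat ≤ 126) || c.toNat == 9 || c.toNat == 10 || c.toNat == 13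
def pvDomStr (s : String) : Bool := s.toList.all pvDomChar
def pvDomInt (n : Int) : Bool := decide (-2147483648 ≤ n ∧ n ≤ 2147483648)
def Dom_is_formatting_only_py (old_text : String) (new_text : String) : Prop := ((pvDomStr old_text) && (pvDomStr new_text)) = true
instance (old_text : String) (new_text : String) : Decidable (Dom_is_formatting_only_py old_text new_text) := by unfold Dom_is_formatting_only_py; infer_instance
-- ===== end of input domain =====

-- B replaces A's per-line pipeline (splitlines / strip / drop blank lines / per-line split+join)
-- by a single global whitespace tokenization ' '.join(text.split()); objective: simpler.


-- ===== PORT A =====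
-- A's inner helper `normalise`: strip every line, drop blank lines, re-join
-- each line's words with single spaces, join the lines with single spaces.
def is_formatting_only_normalise (text : String) : String :=
  let tokens := (PySem.Str.splitlines text).foldl
    (fun tokens line =>
      let stripped := PySem.Str.strip line
      if stripped ≠ "" then
        tokens ++ [PySem.Str.join " " (PySem.Str.split₀ stripped)]
      else tokens) []
  PySem.Str.join " " tokens

def is_formatting_only_py (old_text : String) (new_text : String) : Bool :=
  is_formatting_only_normalise old_text == is_formatting_only_normalise new_text

-- ===== PORT B =====
def is_formatting_only_py_alt (old_text : String) (new_text : String) : Bool :=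
  PySem.Str.join " " (PySem.Str.split₀ old_text) == PySem.Str.join " " (PySem.Str.split₀ new_text)

-- ===== PRECONDITION & SPEC =====
def Spec_is_formatting_only_py (old_text : String) (new_text : String) (out : Bool) : Prop := out = is_formatting_only_py_alt old_text new_text
instance (old_text : String) (new_text : String) (out : Bool) : Decidable (Spec_is_formatting_only_py old_text new_text out) := by unfold Spec_is_formatting_only_py; infer_instance

-- ===== CLAIM (what is proved, stated in full; the proofs are below) =====
def Claim_equal_is_formatting_only_py : Prop := ∀ (old_text : String) (new_text : String), Dom_is_formatting_only_py old_text new_text → Spec_is_formatting_only_py old_text new_text (is_formatting_only_py old_text new_text)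

-- ===== LEMMAS AND PROOFS =====

-- `pvWords cs` = the whitespace-separated words of cs (proof-side reference model).
def pvWords (cs : List Char) : List (List Char) :=
  match cs with
  | [] => []
  | c :: rest =>
    if PySem.Chars.isspace c then pvWords rest
    else (c :: rest.takeWhile (fun d => !PySem.Chars.isspace d)) ::
         pvWords (rest.dropWhile (fun d => !PySem.Chars.isspace d))
termination_by cs.length
decreasing_by
  all_goals have := List.length_dropWhile_le (fun d => !PySem.Chars.isspace d) rest
  all_goals simp
  all_goals omega

theorem pvWords_nil : pvWords [] = [] := by rw [pvWords]

theorem pvWords_cons_space {c : Char} (rest : List Char) (h : PySem.Chars.isspace c = true) :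
    pvWords (c :: rest) = pvWords rest := by
  rw [pvWords]; simp [h]

theorem pvWords_cons_nonspace {c : Char} (rest : List Char) (h : PySem.Chars.isspace c = false) :
    pvWords (c :: rest) =
      (c :: rest.takeWhile (fun d => !PySem.Chars.isspace d)) ::
        pvWords (rest.dropWhile (fun d => !PySem.Chars.isspace d)) := by
  rw [pvWords]; simp [h]

-- prepending one fully-non-space word
theorem pvWords_word_prepend {w : List Char} (hw : ∀ c ∈ w, PySem.Chars.isspace c = false)
    (hne : w ≠ []) (z : List Char) :
    pvWords (w ++ z) =
      (w ++ z.takeWhile (fun d => !PySem.Chars.isspace d)) ::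
        pvWords (z.dropWhile (fun d => !PySem.Chars.isspace d)) := by
  match w, hne with
  | c :: w', _ =>
    have hc : PySem.Chars.isspace c = false := hw c (List.mem_cons_self ..)
    have hw' : w'.takeWhile (fun d => !PySem.Chars.isspace d) = w' :=
      List.takeWhile_eq_self_iff.mpr (fun x hx => by simp [hw x (List.mem_cons_of_mem _ hx)])
    have hd' : w'.dropWhile (fun d => !PySem.Chars.isspace d) = [] :=
      List.dropWhile_eq_nil_iff.mpr (fun x hx => by simp [hw x (List.mem_cons_of_mem _ hx)])
    rw [List.cons_append, pvWords_cons_nonspace _ hc, List.takeWhile_append, List.dropWhile_append,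
      hw', hd']
    simp

theorem pvWords_all_nonspace {w : List Char} (hw : ∀ c ∈ w, PySem.Chars.isspace c = false)
    (hne : w ≠ []) : pvWords w = [w] := by
  have := pvWords_word_prepend hw hne []
  simpa [pvWords_nil] using this

theorem pvWords_space_prefix {t : List Char} (ht : ∀ c ∈ t, PySem.Chars.isspace c = true) :
    ∀ u, pvWords (t ++ u) = pvWords u := by
  induction t with
  | nil => simp
  | cons c t' ih =>
    intro u
    rw [List.cons_append, pvWords_cons_space _ (ht c (List.mem_cons_self ..))]
    exact ih (fun x hx => ht x (List.mem_cons_of_mem _ hx)) u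

-- a non-empty all-space separator splits the word list
theorem pvWords_mid {t : List Char} (ht : ∀ c ∈ t, PySem.Chars.isspace c = true) (htne : t ≠ []) :
    ∀ (s u : List Char), pvWords (s ++ t ++ u) = pvWords s ++ pvWords u := by
  suffices H : ∀ (n : Nat) (s : List Char), s.length ≤ n → ∀ u,
      pvWords (s ++ t ++ u) = pvWords s ++ pvWords u by
    intro s u; exact H s.length s le_rfl u
  intro n
  induction n with
  | zero =>
    intro s hs u
    have hsnil : s = [] := List.eq_nil_of_length_eq_zero (Nat.le_zero.mp hs)
    subst hsnil
    simp [pvWords_nil, pvWords_space_prefix ht]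
  | succ n ih =>
    intro s hs u
    match s with
    | [] => simp [pvWords_nil, pvWords_space_prefix ht]
    | c :: s' =>
      have hs' : s'.length ≤ n := by simp at hs; omega
      by_cases hc : PySem.Chars.isspace c = true
      · rw [List.cons_append, List.cons_append, pvWords_cons_space _ hc, pvWords_cons_space _ hc]
        exact ih s' hs' u
      · have hc' : PySem.Chars.isspace c = false := by simpa using hc
        have hsplit : c :: s' =
            (c :: s'.takeWhile (fun d => !PySem.Chars.isspace d)) ++
              s'.dropWhile (fun d => !PySem.Chars.isspace d) := by
          simp [List.takeWhile_append_dropWhile]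
        have hwns : ∀ x ∈ c :: s'.takeWhile (fun d => !PySem.Chars.isspace d),
            PySem.Chars.isspace x = false := by
          intro x hx
          rcases List.mem_cons.mp hx with h | h
          · subst h; exact hc'
          · simpa using List.mem_takeWhile_imp h
        -- the remainder r ++ t ++ u starts with a whitespace character (or r's head is one)
        have hz : ∀ z, z = s'.dropWhile (fun d => !PySem.Chars.isspace d) ++ t ++ u →
            z.takeWhile (fun d => !PySem.Chars.isspace d) = [] ∧
            z.dropWhile (fun d => !PySem.Chars.isspace d) = z := by
          intro z hzdef
          cases hr : s'.dropWhile (fun d => !PySem.Chars.isspace d) with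
          | nil =>
            match t, htne with
            | a :: t', _ =>
              have ha : PySem.Chars.isspace a = true := ht a (List.mem_cons_self ..)
              subst hzdef; rw [hr]
              simp [ha]
          | cons d r' =>
            have hd : (fun d => !PySem.Chars.isspace d) d = false := by
              have hne' : s'.dropWhile (fun d => !PySem.Chars.isspace d) ≠ [] := by simp [hr]
              have := List.head_dropWhile_not (fun d => !PySem.Chars.isspace d) hne'
              simpa [hr] using this
            subst hzdef; rw [hr]
            simp only [List.cons_append, List.takeWhile_cons, List.dropWhile_cons, hd]
            simp
        obtain ⟨hzt, hzd⟩ := hz _ rfl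
        have hassoc : (c :: s') ++ t ++ u =
            (c :: s'.takeWhile (fun d => !PySem.Chars.isspace d)) ++
              (s'.dropWhile (fun d => !PySem.Chars.isspace d) ++ t ++ u) := by
          conv_lhs => rw [hsplit]
          simp only [List.cons_append, List.append_assoc]
        rw [hassoc, pvWords_word_prepend hwns (by simp) _, hzt, hzd,
          ih _ (le_trans (List.length_dropWhile_le _ _) hs') u,
          pvWords_cons_nonspace _ hc']
        simp

theorem pvWords_space_suffix {t : List Char} (ht : ∀ c ∈ t, PySem.Chars.isspace c = true)
    (s : List Char) : pvWords (s ++ t) = pvWords s := by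
  cases htne : t with
  | nil => simp
  | cons a t' =>
    have := pvWords_mid (t := t) ht (by simp [htne]) s []
    rw [htne] at this
    simpa [pvWords_nil] using this

theorem split₀_go_eq (cs : List Char) : ∀ (cur : List Char) (acc : List (List Char)),
    (∀ c ∈ cur, PySem.Chars.isspace c = false) →
    PySem.Chars.split₀.go cs cur acc = acc.reverse ++ pvWords (cur.reverse ++ cs) := by
  induction cs with
  | nil =>
    intro cur acc hcur
    cases hc : cur with
    | nil => simp [PySem.Chars.split₀.go, pvWords_nil]
    | cons c cur' =>
      have hne : cur.reverse ≠ [] := by simp [hc]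
      have hns : ∀ x ∈ cur.reverse, PySem.Chars.isspace x = false := by
        intro x hx; exact hcur x (List.mem_reverse.mp hx)
      rw [← hc]
      simp only [PySem.Chars.split₀.go, hc]
      simp only [List.isEmpty_cons, List.reverse_cons, List.append_nil]
      have hns' : ∀ x ∈ cur'.reverse ++ [c], PySem.Chars.isspace x = false := by
        simpa [hc] using hns
      simp [pvWords_all_nonspace hns' (by simp)]
  | cons c rest ih =>
    intro cur acc hcur
    by_cases hsp : PySem.Chars.isspace c = true
    · cases hc : cur with
      | nil =>
        rw [PySem.Chars.split₀.go]
        simp only [hsp, List.isEmpty_nil, if_true]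
        rw [ih [] acc (by simp)]
        simp [pvWords_cons_space _ hsp]
      | cons d cur' =>
        rw [← hc, PySem.Chars.split₀.go]
        have hcne : cur.isEmpty = false := by simp [hc]
        simp only [hsp, hcne, if_true, Bool.false_eq_true, if_false]
        rw [ih [] (cur.reverse :: acc) (by simp)]
        have hns : ∀ x ∈ cur.reverse, PySem.Chars.isspace x = false := by
          intro x hx; exact hcur x (List.mem_reverse.mp hx)
        rw [pvWords_word_prepend hns (by simp [hc]) (c :: rest)]
        simp [hsp, pvWords_cons_space _ hsp]
    · have hsp' : PySem.Chars.isspace c = false := by simpa using hsp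
      rw [PySem.Chars.split₀.go]
      simp only [hsp', Bool.false_eq_true, if_false]
      rw [ih (c :: cur) acc (by
        intro x hx
        rcases List.mem_cons.mp hx with h | h
        · subst h; exact hsp'
        · exact hcur x h)]
      simp [List.append_assoc]

theorem split₀_eq_pvWords (cs : List Char) : PySem.Chars.split₀ cs = pvWords cs := by
  have := split₀_go_eq cs [] [] (by simp)
  simpa [PySem.Chars.split₀] using this

theorem splitlines_go_flatMap (P : Char → Bool) (hP : ∀ c, P c = true → PySem.Chars.isspace c = true) :
    ∀ (n : Nat) (cs : List Char), cs.length ≤ n → ∀ (cur : List Char) (acc : List (List Char)),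
    (PySem.Chars.splitlines.go P cs cur acc).flatMap pvWords =
      acc.reverse.flatMap pvWords ++ pvWords (cur.reverse ++ cs) := by
  intro n
  induction n with
  | zero =>
    intro cs hcs cur acc
    have hnil : cs = [] := List.eq_nil_of_length_eq_zero (Nat.le_zero.mp hcs)
    subst hnil
    rw [PySem.Chars.splitlines.go.eq_def]
    cases hc : cur with
    | nil => simp [pvWords_nil]
    | cons d cur' => simp
  | succ n ih =>
    intro cs hcs cur acc
    rw [PySem.Chars.splitlines.go.eq_def]
    split
    · -- cs = []
      cases hc : cur with
      | nil => simp [pvWords_nil]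
      | cons d cur' => simp
    · -- cs = '\r' :: '\n' :: rest
      rename_i rest
      have hrest : rest.length ≤ n := by simp at hcs; omega
      rw [ih rest hrest [] (cur.reverse :: acc)]
      have ha : cur.reverse ++ '\r' :: '\n' :: rest = cur.reverse ++ ['\r', '\n'] ++ rest := by
        simp
      rw [ha, pvWords_mid (t := ['\r', '\n'])
        (by intro x hx; simp at hx; rcases hx with h | h <;> subst h <;> rfl)
        (by simp) cur.reverse rest]
      simp [List.flatMap_append, List.append_assoc]
    · -- cs = c :: rest, not starting a CRLF pair
      rename_i x1 x2 x3 c rest hnotcrlf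
      have hrest : rest.length ≤ n := by simp at hcs; omega
      by_cases hb : P c = true
      · simp only [hb, if_true]
        rw [ih rest hrest [] (cur.reverse :: acc)]
        have ha : cur.reverse ++ c :: rest = cur.reverse ++ [c] ++ rest := by simp
        rw [ha, pvWords_mid (t := [c]) (by intro x hx; simp at hx; subst hx; exact hP _ hb)
          (by simp) cur.reverse rest]
        simp [List.flatMap_append, List.append_assoc]
      · simp only [hb, Bool.false_eq_true, if_false]
        rw [ih rest hrest (c :: cur) acc]
        simp [List.append_assoc]

theorem splitlines_flatMap (cs : List Char) :
    (PySem.Chars.splitlines cs).flatMap pvWords = pvWords cs := by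
  rw [PySem.Chars.splitlines]
  rw [splitlines_go_flatMap _ (by
      intro c h
      simp only [Bool.or_eq_true, decide_eq_true_eq] at h
      rw [PySem.Chars.isspace]
      simp only [Bool.or_eq_true, Bool.and_eq_true, decide_eq_true_eq]
      omega) cs.length cs le_rfl [] []]
  simp

theorem pvWords_lstrip (l : List Char) : pvWords (PySem.Chars.lstrip l) = pvWords l := by
  conv_rhs => rw [← List.takeWhile_append_dropWhile (p := PySem.Chars.isspace) (l := l)]
  rw [pvWords_space_prefix (fun x hx => List.mem_takeWhile_imp hx)]
  rfl

theorem pvWords_rstrip (l : List Char) : pvWords (PySem.Chars.rstrip l) = pvWords l := by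
  have hl : l = PySem.Chars.rstrip l ++ (l.reverse.takeWhile PySem.Chars.isspace).reverse := by
    rw [PySem.Chars.rstrip, ← List.reverse_append, List.takeWhile_append_dropWhile,
      List.reverse_reverse]
  conv_rhs => rw [hl]
  rw [pvWords_space_suffix (t := (l.reverse.takeWhile PySem.Chars.isspace).reverse)
    (fun x hx => List.mem_takeWhile_imp (List.mem_reverse.mp hx))]

theorem pvWords_strip (l : List Char) : pvWords (PySem.Chars.strip l) = pvWords l := by
  rw [PySem.Chars.strip, pvWords_rstrip, pvWords_lstrip]

theorem pvWords_eq_nil_iff (l : List Char) :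
    pvWords l = [] ↔ ∀ c ∈ l, PySem.Chars.isspace c = true := by
  constructor
  · intro h
    induction l with
    | nil => simp
    | cons c rest ih =>
      by_cases hc : PySem.Chars.isspace c = true
      · rw [pvWords_cons_space _ hc] at h
        intro x hx
        rcases List.mem_cons.mp hx with hx | hx
        · subst hx; exact hc
        · exact ih h x hx
      · rw [pvWords_cons_nonspace _ (by simpa using hc)] at h
        exact absurd h (by simp)
  · intro h
    have := pvWords_space_prefix (t := l) h []
    simpa [pvWords_nil] using this

theorem strip_eq_nil_iff (l : List Char) :
    PySem.Chars.strip l = [] ↔ ∀ c ∈ l, PySem.Chars.isspace c = true := by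
  constructor
  · intro h
    have hls : ∀ c ∈ PySem.Chars.lstrip l, PySem.Chars.isspace c = true := by
      have h' : (PySem.Chars.lstrip l).reverse.dropWhile PySem.Chars.isspace = [] := by
        have := congrArg List.reverse h
        simpa [PySem.Chars.strip, PySem.Chars.rstrip] using this
      intro c hc
      exact List.dropWhile_eq_nil_iff.mp h' c (List.mem_reverse.mpr hc)
    intro c hc
    rw [← List.takeWhile_append_dropWhile (p := PySem.Chars.isspace) (l := l)] at hc
    rcases List.mem_append.mp hc with hc | hc
    · exact List.mem_takeWhile_imp hc
    · exact hls c hc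
  · intro h
    have h1 : PySem.Chars.lstrip l = [] :=
      List.dropWhile_eq_nil_iff.mpr h
    rw [PySem.Chars.strip, h1]
    rfl

theorem join_cons (sep x : List Char) (L : List (List Char)) :
    PySem.Chars.join sep (x :: L) = x ++ (if L = [] then [] else sep ++ PySem.Chars.join sep L) := by
  cases L with
  | nil => simp [PySem.Chars.join_singleton]
  | cons y rest => simp [PySem.Chars.join_cons_cons, List.append_assoc]

theorem join_append (sep : List Char) {a b : List (List Char)} (ha : a ≠ []) (hb : b ≠ []) :
    PySem.Chars.join sep (a ++ b) = PySem.Chars.join sep a ++ sep ++ PySem.Chars.join sep b := by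
  induction a with
  | nil => exact absurd rfl ha
  | cons x a' ih =>
    cases a' with
    | nil =>
      cases b with
      | nil => exact absurd rfl hb
      | cons y rest =>
        simp [PySem.Chars.join_cons_cons, PySem.Chars.join_singleton, List.append_assoc]
    | cons y a'' =>
      match b, hb with
      | b0 :: bt, _ =>
        have h := ih (by simp)
        rw [List.cons_append] at h
        rw [show (x :: y :: a'') ++ (b0 :: bt) = x :: (y :: (a'' ++ b0 :: bt)) by simp,
          PySem.Chars.join_cons_cons sep x y, h, PySem.Chars.join_cons_cons sep x y]
        simp [List.append_assoc]

theorem join_filter_flatten (sep : List Char) (tss : List (List (List Char))) :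
    PySem.Chars.join sep ((tss.filter (· ≠ [])).map (PySem.Chars.join sep)) =
      PySem.Chars.join sep tss.flatten := by
  induction tss with
  | nil => rfl
  | cons ts rest ih =>
    by_cases hts : ts = []
    · simpa [hts] using ih
    · rw [List.flatten_cons, List.filter_cons_of_pos (by simpa using hts), List.map_cons]
      by_cases hfr : rest.flatten = []
      · have hfilter : rest.filter (· ≠ []) = [] :=
          List.filter_eq_nil_iff.mpr (fun a ha => by
            simp [List.flatten_eq_nil_iff.mp hfr a ha])
        rw [hfilter, hfr]
        simp [PySem.Chars.join_singleton]
      · have hfilter : rest.filter (· ≠ []) ≠ [] := by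
          intro hnil
          apply hfr
          rw [List.flatten_eq_nil_iff]
          intro l hl
          by_contra hlne
          have : l ∈ rest.filter (· ≠ []) := List.mem_filter.mpr ⟨hl, by simpa using hlne⟩
          rw [hnil] at this
          simp at this
        rw [join_cons, if_neg (by simpa using hfilter), ih,
          join_append sep hts hfr]
        simp [List.append_assoc]

theorem normalise_eq (t : String) :
    is_formatting_only_normalise t = PySem.Str.join " " (PySem.Str.split₀ t) := by
  apply String.toList_inj.mp
  unfold is_formatting_only_normalise
  have hfun : (fun (tokens : List String) line =>
      let stripped := PySem.Str.strip line
      if stripped ≠ "" then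
        tokens ++ [PySem.Str.join " " (PySem.Str.split₀ stripped)]
      else tokens)
    = (fun (tokens : List String) line =>
      if (fun l => decide (PySem.Str.strip l ≠ "")) line = true then
        tokens ++ [(fun l => PySem.Str.join " " (PySem.Str.split₀ (PySem.Str.strip l))) line]
      else tokens) := by
    funext tokens line
    simp
  rw [hfun, PySem.List.foldl_append_if (fun l => decide (PySem.Str.strip l ≠ ""))
    (fun l => PySem.Str.join " " (PySem.Str.split₀ (PySem.Str.strip l)))
    (PySem.Str.splitlines t) []]
  rw [List.nil_append, PySem.Str.toList_join, PySem.Str.toList_join]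
  -- right side: the words of the whole text
  rw [PySem.Str.split₀_map_toList, split₀_eq_pvWords]
  -- left side: push everything down to pvWords on char lists
  have hmapf : ∀ L : List String,
      List.map String.toList (List.map (fun l => PySem.Str.join " " (PySem.Str.split₀ (PySem.Str.strip l))) L)
        = List.map (fun m => PySem.Chars.join " ".toList (pvWords m)) (List.map String.toList L) := by
    intro L
    rw [List.map_map, List.map_map]
    apply List.map_congr_left
    intro l _
    show (PySem.Str.join " " (PySem.Str.split₀ (PySem.Str.strip l))).toList = _
    rw [PySem.Str.toList_join, PySem.Str.split₀_map_toList, split₀_eq_pvWords,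
      PySem.Str.toList_strip, pvWords_strip]
    rfl
  have hpred : ∀ l : String, (decide (PySem.Str.strip l ≠ "")) = decide (pvWords l.toList ≠ []) := by
    intro l
    congr 1
    apply propext
    constructor
    · intro h hw
      apply h
      apply String.toList_inj.mp
      rw [PySem.Str.toList_strip]
      have : ∀ c ∈ l.toList, PySem.Chars.isspace c = true := (pvWords_eq_nil_iff _).mp hw
      simpa using (strip_eq_nil_iff l.toList).mpr this
    · intro h hs
      apply h
      apply (pvWords_eq_nil_iff _).mpr
      apply (strip_eq_nil_iff l.toList).mp
      rw [← PySem.Str.toList_strip, hs]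
      rfl
  have hfilter : List.map String.toList
      (List.filter (fun l => decide (PySem.Str.strip l ≠ "")) (PySem.Str.splitlines t))
      = List.filter (fun m => decide (pvWords m ≠ [])) (PySem.Chars.splitlines t.toList) := by
    rw [← PySem.Str.splitlines_map_toList, List.filter_map]
    congr 1
    apply List.filter_congr
    intro l _
    rw [hpred l]
    rfl
  rw [hmapf, hfilter]
  -- now pure char-list reasoning
  have hfm : List.map (fun m => PySem.Chars.join " ".toList (pvWords m))
        (List.filter (fun m => decide (pvWords m ≠ [])) (PySem.Chars.splitlines t.toList))
      = List.map (PySem.Chars.join " ".toList)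
        (List.filter (· ≠ []) (List.map pvWords (PySem.Chars.splitlines t.toList))) := by
    rw [List.filter_map, List.map_map]
    rfl
  rw [hfm, join_filter_flatten, ← List.flatMap_def, splitlines_flatMap]

-- ===== VERDICT (by name: the statement is the Claim_ definition above) =====
theorem is_formatting_only_py_spec : Claim_equal_is_formatting_only_py := by
  intro o n _
  unfold Spec_is_formatting_only_py is_formatting_only_py is_formatting_only_py_alt
  rw [normalise_eq o, normalise_eq n]
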